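-- pv_equiv track=rewrite | github.com/Chihui8199/CZ4031-Project-2 | Reference/preprocessing.py | prepare_highlighting_sql_query_character_map
-- ===== SOURCE A (Python) =====
-- def prepare_highlighting_sql_query_character_map(query):
--     """
--     Preprocess query to prepare for highlighting during annotation phase.
--
--     Look into python tkinter text tagging for more information.
--
--     During tagging we need to specify the specific line number and character (column)
--     """
--     index_map = {}
--     line = 1
--     column = 0
--     index = 0
--     while index <= len(query):
--         index_map[index] = f'{line}.{column}'
--         if index < len(query) and query[index] == '\n':
--             line += 1
--             column = 0
--         else:
--             column += 1
--         index += 1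
--     return index_map;
-- ===== SOURCE B (Python) =====
-- def prepare_highlighting_sql_query_character_map(query):
--     index_map = {}
--     index = 0
--     for ln, content in enumerate(query.split('\n'), start=1):
--         for col in range(len(content) + 1):
--             index_map[index] = f'{ln}.{col}'
--             index += 1
--     return index_map
-- ===== Notes on version B (the rewrite author's own statement) =====
-- stated objective: simpler
-- what changed: B replaces A's character-by-character while loop with its per-character newline branch and line/column state machine by splitting the query into lines once and emitting columns 0..len(line) per line with a running global index.
import Mathlib
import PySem

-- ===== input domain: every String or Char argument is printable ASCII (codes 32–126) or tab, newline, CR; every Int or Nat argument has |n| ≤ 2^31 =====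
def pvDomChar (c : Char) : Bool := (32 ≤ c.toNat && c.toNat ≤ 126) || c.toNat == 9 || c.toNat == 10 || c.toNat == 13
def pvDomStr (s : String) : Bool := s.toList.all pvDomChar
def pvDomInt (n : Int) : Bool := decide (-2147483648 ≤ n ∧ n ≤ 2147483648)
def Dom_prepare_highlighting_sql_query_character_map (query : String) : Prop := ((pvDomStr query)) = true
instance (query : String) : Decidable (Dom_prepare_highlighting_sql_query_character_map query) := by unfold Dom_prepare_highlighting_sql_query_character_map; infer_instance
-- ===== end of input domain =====

-- B builds the same index → "line.column" map by splitting the query into lines once and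
-- emitting columns 0..len(line) per line with a running global index (simpler decomposition,
-- no per-character newline branch).

-- ===== PORT A =====
-- while index <= len(query): insert index -> f'{line}.{column}'; advance depending on query[index] == '\n'
def pvLoopA (cs : List Char) (d : PySem.Dict Int String) (line column : Int) (index : Nat) :
    PySem.Dict Int String :=
  if index ≤ cs.length then
    let d' := d.insert (index : Int) (PySem.Int.toStr line ++ "." ++ PySem.Int.toStr column)
    if index < cs.length ∧ PySem.List.pyGet? cs (index : Int) = some '\n' then
      pvLoopA cs d' (line + 1) 0 (index + 1)
    else
      pvLoopA cs d' line (column + 1) (index + 1)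
  else d
  termination_by cs.length + 1 - index

def prepare_highlighting_sql_query_character_map (query : String) : List (Int × String) :=
  (pvLoopA query.toList PySem.Dict.empty 1 0 0).items

-- ===== PORT B =====
-- for ln, content in enumerate(query.split('\n'), start=1): for col in range(len(content)+1): insert
def prepare_highlighting_sql_query_character_map_alt (query : String) : List (Int × String) :=
  let segments := PySem.Chars.splitOn query.toList ['\n']
  ((PySem.List.enumerate segments 1).foldl
    (fun (st : PySem.Dict Int String × Int) p =>
      (PySem.List.pyRange 0 ((p.2.length : Int) + 1) 1).foldl
        (fun (st : PySem.Dict Int String × Int) col =>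
          (st.1.insert st.2 (PySem.Int.toStr p.1 ++ "." ++ PySem.Int.toStr col), st.2 + 1))
        st)
    (PySem.Dict.empty, (0 : Int))).1.items

-- ===== PRECONDITION & SPEC =====
def Spec_prepare_highlighting_sql_query_character_map (query : String) (out : List (Int × String)) : Prop := out = prepare_highlighting_sql_query_character_map_alt query
instance (query : String) (out : List (Int × String)) : Decidable (Spec_prepare_highlighting_sql_query_character_map query out) := by unfold Spec_prepare_highlighting_sql_query_character_map; infer_instance

-- ===== CLAIM (what is proved, stated in full; the proofs are below) =====
def Claim_equal_prepare_highlighting_sql_query_character_map : Prop := ∀ (query : String), Dom_prepare_highlighting_sql_query_character_map query → Spec_prepare_highlighting_sql_query_character_map query (prepare_highlighting_sql_query_character_map query)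

-- ===== LEMMAS AND PROOFS =====

-- proof-side abbreviation for f'{line}.{column}'
def pvFmt (line column : Int) : String := PySem.Int.toStr line ++ "." ++ PySem.Int.toStr column

-- middle ground between the two ports: process the remaining characters one at a time
def pvEmit (d : PySem.Dict Int String) (line column idx : Int) : List Char → PySem.Dict Int String
  | [] => d.insert idx (pvFmt line column)
  | c :: cs =>
    if c = '\n' then pvEmit (d.insert idx (pvFmt line column)) (line + 1) 0 (idx + 1) cs
    else pvEmit (d.insert idx (pvFmt line column)) line (column + 1) (idx + 1) cs

-- B's inner loop as a function
def pvLine (ln : Int) (content : List Char) (st : PySem.Dict Int String × Int) :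
    PySem.Dict Int String × Int :=
  (PySem.List.pyRange 0 ((content.length : Int) + 1) 1).foldl
    (fun st col => (st.1.insert st.2 (pvFmt ln col), st.2 + 1)) st

-- line-list recursion
def pvEmitLines (d : PySem.Dict Int String) (ln idx : Int) : List (List Char) → PySem.Dict Int String
  | [] => d
  | content :: rest =>
    let p := pvLine ln content (d, idx)
    pvEmitLines p.1 (ln + 1) p.2 rest

-- reference form of split('\n')
def pvSplit (pre : List Char) : List Char → List (List Char)
  | [] => [pre]
  | c :: cs => if c = '\n' then pre :: pvSplit [] cs else pvSplit (pre ++ [c]) cs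

theorem pvLoopA_eq_pvEmit (suf : List Char) : ∀ (pre : List Char) d line column,
    pvLoopA (pre ++ suf) d line column pre.length = pvEmit d line column (pre.length : Int) suf := by
  induction suf with
  | nil =>
    intro pre d line column
    rw [pvLoopA]
    simp [pvEmit, pvFmt]
    rw [pvLoopA]
    simp
  | cons c cs ih =>
    intro pre d line column
    rw [pvLoopA]
    have hlt : pre.length < (pre ++ c :: cs).length := by simp
    have hget : PySem.List.pyGet? (pre ++ c :: cs) (pre.length : Int) = some c :=
      PySem.List.pyGet?_append_length pre cs c
    rw [if_pos (Nat.le_of_lt hlt)]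
    simp only [hget, hlt, true_and, Option.some_inj]
    by_cases hc : c = '\n'
    · subst hc
      rw [if_pos rfl, pvEmit, if_pos rfl]
      have := ih (pre ++ ['\n']) (d.insert (pre.length : Int) (pvFmt line column)) (line + 1) 0
      simpa [pvFmt, Nat.add_comm] using this
    · rw [if_neg hc, pvEmit, if_neg hc]
      have := ih (pre ++ [c]) (d.insert (pre.length : Int) (pvFmt line column)) line (column + 1)
      simpa [pvFmt, Nat.add_comm] using this

theorem pvGo_spec (l : List Char) : ∀ (fuel : Nat), l.length < fuel → ∀ (cur : List Char) (accs : List (List Char)),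
    PySem.Chars.splitOn.go ['\n'] fuel l cur accs = accs.reverse ++ pvSplit cur.reverse l := by
  induction l with
  | nil =>
    intro fuel h cur accs
    match fuel, h with
    | f + 1, _ =>
      rw [PySem.Chars.splitOn.go]
      simp [pvSplit]
      omega
  | cons c rest ih =>
    intro fuel h cur accs
    match fuel, h with
    | f + 1, h =>
      rw [PySem.Chars.splitOn.go]
      by_cases hc : c = '\n'
      · subst hc
        have hp : List.isPrefixOf ['\n'] ('\n' :: rest) = true := by simp [List.isPrefixOf]
        rw [if_pos hp]
        simp only [List.length_cons] at h
        simp only [List.length_singleton, List.drop_succ_cons, List.drop_zero]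
        rw [ih f (by omega) [] (cur.reverse :: accs)]
        simp [pvSplit]
      · have hp : List.isPrefixOf ['\n'] (c :: rest) = false := by
          simp [List.isPrefixOf]
          exact fun h => hc h.symm
        rw [if_neg (by simp [hp])]
        simp only [List.length_cons] at h
        rw [ih f (by omega) (c :: cur) accs]
        simp [pvSplit, hc]

theorem pvSplitOn_eq_pvSplit (cs : List Char) :
    PySem.Chars.splitOn cs ['\n'] = pvSplit [] cs := by
  have := pvGo_spec cs (cs.length + 1) (by omega) [] []
  simpa [PySem.Chars.splitOn] using this


theorem pvFold_line_last (content : List Char) (h : '\n' ∉ content) :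
    ∀ (d : PySem.Dict Int String) (ln col idx : Int),
    pvEmit d ln col idx content
      = ((PySem.List.pyRange col (col + content.length + 1) 1).foldl
          (fun st c => (st.1.insert st.2 (pvFmt ln c), st.2 + 1)) (d, idx)).1 := by
  induction content with
  | nil =>
    intro d ln col idx
    rw [PySem.List.pyRange_one_cons (by simp), PySem.List.pyRange_one_eq_nil (by simp)]
    simp [pvEmit]
  | cons c cs ih =>
    intro d ln col idx
    have hc : c ≠ '\n' := fun hc => h (hc ▸ List.mem_cons_self)
    rw [PySem.List.pyRange_one_cons (by simp; omega)]
    simp only [List.foldl_cons]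
    rw [pvEmit, if_neg hc]
    have := ih (fun hm => h (List.mem_cons_of_mem c hm)) (d.insert idx (pvFmt ln col)) ln (col + 1) (idx + 1)
    rw [this]
    ring_nf
    simp [List.length_cons]
    ring_nf

theorem pvFold_line_cont (content : List Char) (h : '\n' ∉ content) :
    ∀ (rest : List Char) (d : PySem.Dict Int String) (ln col idx : Int),
    pvEmit d ln col idx (content ++ '\n' :: rest)
      = (fun p => pvEmit p.1 (ln + 1) 0 p.2 rest)
          ((PySem.List.pyRange col (col + content.length + 1) 1).foldl
            (fun st c => (st.1.insert st.2 (pvFmt ln c), st.2 + 1)) (d, idx)) := by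
  induction content with
  | nil =>
    intro rest d ln col idx
    rw [PySem.List.pyRange_one_cons (by simp), PySem.List.pyRange_one_eq_nil (by simp)]
    simp only [List.nil_append, List.foldl_cons, List.foldl_nil]
    rw [pvEmit, if_pos rfl]
  | cons c cs ih =>
    intro rest d ln col idx
    have hc : c ≠ '\n' := fun hc => h (hc ▸ List.mem_cons_self)
    rw [PySem.List.pyRange_one_cons (by simp; omega)]
    simp only [List.foldl_cons, List.cons_append]
    rw [pvEmit, if_neg hc]
    have := ih (fun hm => h (List.mem_cons_of_mem c hm)) rest (d.insert idx (pvFmt ln col)) ln (col + 1) (idx + 1)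
    rw [this]
    simp [List.length_cons]
    ring_nf

theorem pvSplit_no_nl (l : List Char) (h : '\n' ∉ l) : ∀ pre, pvSplit pre l = [pre ++ l] := by
  induction l with
  | nil => intro pre; simp [pvSplit]
  | cons c cs ih =>
    intro pre
    have hc : c ≠ '\n' := fun hc => h (hc ▸ List.mem_cons_self)
    rw [pvSplit, if_neg hc, ih (fun hm => h (List.mem_cons_of_mem c hm))]
    simp

theorem pvSplit_first (t : List Char) (h : '\n' ∉ t) :
    ∀ (r : List Char) (pre : List Char), pvSplit pre (t ++ '\n' :: r) = (pre ++ t) :: pvSplit [] r := by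
  induction t with
  | nil => intro r pre; simp [pvSplit]
  | cons c cs ih =>
    intro r pre
    have hc : c ≠ '\n' := fun hc => h (hc ▸ List.mem_cons_self)
    rw [List.cons_append, pvSplit, if_neg hc, ih (fun hm => h (List.mem_cons_of_mem c hm))]
    simp

theorem pvSplit_decomp (cs : List Char) (h : '\n' ∈ cs) :
    ∃ t r, cs = t ++ '\n' :: r ∧ '\n' ∉ t := by
  induction cs with
  | nil => cases h
  | cons c rest ih =>
    by_cases hc : c = '\n'
    · exact ⟨[], rest, by simp [hc], by simp⟩
    · obtain ⟨t, r, hrw, hnt⟩ := ih (by cases h with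
        | head => exact absurd rfl hc
        | tail _ hm => exact hm)
      exact ⟨c :: t, r, by simp [hrw], by simp [hnt, Ne.symm, hc]⟩

theorem pvEmit_eq_pvEmitLines_aux (n : Nat) : ∀ (cs : List Char), cs.length = n →
    ∀ (d : PySem.Dict Int String) (ln idx : Int),
    pvEmit d ln 0 idx cs = pvEmitLines d ln idx (pvSplit [] cs) := by
  induction n using Nat.strong_induction_on with
  | _ n ih =>
    intro cs hlen d ln idx
    by_cases h : '\n' ∈ cs
    · obtain ⟨t, r, rfl, hnt⟩ := pvSplit_decomp cs h
      rw [pvSplit_first t hnt r [], pvEmitLines]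
      have hcont := pvFold_line_cont t hnt r d ln 0 idx
      simp only [zero_add] at hcont
      rw [hcont]
      simp only [List.nil_append, pvLine]
      exact ih r.length (by simp at hlen; omega) r rfl _ _ _
    · rw [pvSplit_no_nl cs h [], List.nil_append, pvEmitLines, pvEmitLines]
      have := pvFold_line_last cs h d ln 0 idx
      simp only [zero_add] at this
      rw [this, pvLine]

theorem pvEmit_eq_pvEmitLines (cs : List Char) (d : PySem.Dict Int String) (ln idx : Int) :
    pvEmit d ln 0 idx cs = pvEmitLines d ln idx (pvSplit [] cs) :=
  pvEmit_eq_pvEmitLines_aux cs.length cs rfl d ln idx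

theorem pvFold_eq_pvEmitLines (ss : List (List Char)) : ∀ (d : PySem.Dict Int String) (ln idx : Int),
    ((PySem.List.enumerate ss ln).foldl
      (fun (st : PySem.Dict Int String × Int) p =>
        (PySem.List.pyRange 0 ((p.2.length : Int) + 1) 1).foldl
          (fun st col => (st.1.insert st.2 (PySem.Int.toStr p.1 ++ "." ++ PySem.Int.toStr col), st.2 + 1))
          st) (d, idx)).1
    = pvEmitLines d ln idx ss := by
  induction ss with
  | nil => intro d ln idx; simp [PySem.List.enumerate, pvEmitLines]
  | cons content rest ih =>
    intro d ln idx
    rw [show PySem.List.enumerate (content :: rest) ln = (ln, content) :: PySem.List.enumerate rest (ln + 1) from by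
      simp [PySem.List.enumerate]]
    simp only [List.foldl_cons]
    rw [pvEmitLines]
    have : (PySem.List.pyRange 0 ((content.length : Int) + 1) 1).foldl
        (fun (st : PySem.Dict Int String × Int) col => (st.1.insert st.2 (PySem.Int.toStr ln ++ "." ++ PySem.Int.toStr col), st.2 + 1)) (d, idx)
        = pvLine ln content (d, idx) := by
      simp [pvLine, pvFmt]
    rw [this]
    exact ih _ _ _

-- ===== VERDICT (by name: the statement is the Claim_ definition above) =====
theorem prepare_highlighting_sql_query_character_map_spec : Claim_equal_prepare_highlighting_sql_query_character_map := by
  intro query _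
  unfold Spec_prepare_highlighting_sql_query_character_map
  unfold prepare_highlighting_sql_query_character_map prepare_highlighting_sql_query_character_map_alt
  have hA := pvLoopA_eq_pvEmit query.toList [] PySem.Dict.empty 1 0
  simp only [List.nil_append, List.length_nil, Nat.cast_zero] at hA
  rw [hA, pvEmit_eq_pvEmitLines, ← pvSplitOn_eq_pvSplit, ← pvFold_eq_pvEmitLines]
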